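-- pv_equiv track=rewrite | github.com/hansol-rgb/ysl | projects/ysl/scripts/build_visibility_report_v2.py | split_datasets
-- ===== SOURCE A (Python) =====
-- def split_datasets(responses, citations):
--     combined_resp = responses
--     q_resp = [r for r in responses if r.get("Keyword/Query") == "question"]
--     kw_resp = [r for r in responses if r.get("Keyword/Query") == "keyword"]
--
--     combined_cit = citations
--     q_cit = [c for c in citations if c.get("Keyword/Query") == "question"]
--     kw_cit = [c for c in citations if c.get("Keyword/Query") == "keyword"]
--
--     return [
--         ("Combined", combined_resp, combined_cit),
--         ("Q-side", q_resp, q_cit),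
--         ("KW-side", kw_resp, kw_cit),
--     ]
-- ===== SOURCE B (Python) =====
-- def _group_by_type(items):
--     groups = {}
--     for it in items:
--         groups.setdefault(it.get("Keyword/Query"), []).append(it)
--     return groups
--
--
-- def split_datasets(responses, citations):
--     g_resp = _group_by_type(responses)
--     g_cit = _group_by_type(citations)
--     return [
--         ("Combined", responses, citations),
--         ("Q-side", g_resp.get("question", []), g_cit.get("question", [])),
--         ("KW-side", g_resp.get("keyword", []), g_cit.get("keyword", [])),
--     ]
-- ===== Notes on version B (the rewrite author's own statement) =====
-- stated objective: alternative
-- what changed: Instead of filtering each list twice by a fixed value, B builds a grouping dictionary keyed by the record's 'Keyword/Query' value in one pass per list and then reads the 'question' and 'keyword' buckets from that index.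
import Mathlib
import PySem

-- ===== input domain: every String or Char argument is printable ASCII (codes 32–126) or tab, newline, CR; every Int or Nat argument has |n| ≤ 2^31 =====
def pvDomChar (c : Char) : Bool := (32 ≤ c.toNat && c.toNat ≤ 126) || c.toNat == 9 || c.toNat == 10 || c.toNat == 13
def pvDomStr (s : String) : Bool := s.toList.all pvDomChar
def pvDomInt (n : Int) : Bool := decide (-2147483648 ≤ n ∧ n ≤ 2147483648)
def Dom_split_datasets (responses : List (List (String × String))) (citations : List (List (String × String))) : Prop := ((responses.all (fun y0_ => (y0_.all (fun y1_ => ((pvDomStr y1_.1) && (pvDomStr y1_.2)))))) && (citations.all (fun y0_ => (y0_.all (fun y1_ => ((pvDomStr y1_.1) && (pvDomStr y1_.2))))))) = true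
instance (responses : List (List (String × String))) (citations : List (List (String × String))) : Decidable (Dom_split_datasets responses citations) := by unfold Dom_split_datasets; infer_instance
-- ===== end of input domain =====

-- B replaces A's four filter comprehensions with one grouping dictionary (setdefault/append index) per input list, read at two keys (objective: alternative; same cost).


-- ===== PORT A =====
-- r.get("Keyword/Query") on the association-list dict: first-match lookup via PySem.Dict
def pvGetKQ (r : List (String × String)) : Option String :=
  (PySem.Dict.mk r).get? "Keyword/Query"

def split_datasets (responses : List (List (String × String))) (citations : List (List (String × String))) : List (String × (List (List (String × String))) × (List (List (String × String)))) :=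
  let combined_resp := responses
  let q_resp := responses.filter (fun r => pvGetKQ r == some "question")
  let kw_resp := responses.filter (fun r => pvGetKQ r == some "keyword")
  let combined_cit := citations
  let q_cit := citations.filter (fun c => pvGetKQ c == some "question")
  let kw_cit := citations.filter (fun c => pvGetKQ c == some "keyword")
  [("Combined", combined_resp, combined_cit),
   ("Q-side", q_resp, q_cit),
   ("KW-side", kw_resp, kw_cit)]

-- ===== PORT B =====
-- B's grouping index: groups.setdefault(it.get("Keyword/Query"), []).append(it) = Dict.modify key [] (· ++ [it])
def pvGroupByType (items : List (List (String × String))) : PySem.Dict (Option String) (List (List (String × String))) :=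
  items.foldl (fun groups it => groups.modify (pvGetKQ it) [] (· ++ [it])) PySem.Dict.empty

def split_datasets_alt (responses : List (List (String × String))) (citations : List (List (String × String))) : List (String × (List (List (String × String))) × (List (List (String × String)))) :=
  let gr := pvGroupByType responses
  let gc := pvGroupByType citations
  [("Combined", responses, citations),
   ("Q-side", gr.getD (some "question") [], gc.getD (some "question") []),
   ("KW-side", gr.getD (some "keyword") [], gc.getD (some "keyword") [])]

-- ===== PRECONDITION & SPEC =====
def Spec_split_datasets (responses : List (List (String × String))) (citations : List (List (String × String))) (out : List (String × (List (List (String × String))) × (List (List (String × String))))) : Prop := out = split_datasets_alt responses citations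
instance (responses : List (List (String × String))) (citations : List (List (String × String))) (out : List (String × (List (List (String × String))) × (List (List (String × String))))) : Decidable (Spec_split_datasets responses citations out) := by unfold Spec_split_datasets; infer_instance

-- ===== CLAIM (what is proved, stated in full; the proofs are below) =====
def Claim_equal_split_datasets : Prop := ∀ (responses : List (List (String × String))) (citations : List (List (String × String))), Dom_split_datasets responses citations → Spec_split_datasets responses citations (split_datasets responses citations)

-- ===== LEMMAS AND PROOFS =====
-- Reading key k of the grouping index gives exactly the filter of the input by that key.
theorem pvGroupByType_getD (items : List (List (String × String))) (k : Option String) :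
    (pvGroupByType items).getD k [] = items.filter (fun r => pvGetKQ r == k) := by
  unfold pvGroupByType
  have h : items.foldl (fun groups it => groups.modify (pvGetKQ it) [] (· ++ [it])) PySem.Dict.empty
      = (items.map (fun r => (pvGetKQ r, r))).foldl
          (fun groups p => groups.modify p.1 [] (· ++ [p.2])) PySem.Dict.empty := by
    rw [List.foldl_map]
  rw [h, PySem.Dict.getD_foldl_modify_append]
  simp [List.filter_map, Function.comp_def]

-- ===== VERDICT (by name: the statement is the Claim_ definition above) =====
theorem split_datasets_spec : Claim_equal_split_datasets := by
  intro responses citations _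
  unfold Spec_split_datasets split_datasets split_datasets_alt
  simp [pvGroupByType_getD]
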